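-- pv_equiv track=rewrite | github.com/toki866/ApexTraderAI | tools/check_leak_causality.py | _detect_close_col
-- ===== SOURCE A (Python) =====
-- from typing import List, Optional, Dict, Tuple
--
-- def _detect_close_col(cols: List[str]) -> Optional[str]:
--     for key in ("close_eff", "closeeff", "p_eff", "peff"):
--         for c in cols:
--             if c.lower() == key:
--                 return c
--     for c in cols:
--         if c.lower() == "close":
--             return c
--     for c in cols:
--         if "close" in c.lower():
--             return c
--     return None
-- ===== SOURCE B (Python) =====
-- def _detect_close_col(cols):
--     index = {}
--     sub = None
--     for c in cols:
--         lc = c.lower()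
--         if lc not in index:
--             index[lc] = c
--         if sub is None and "close" in lc:
--             sub = c
--     for key in ("close_eff", "closeeff", "p_eff", "peff"):
--         if key in index:
--             return index[key]
--     if "close" in index:
--         return index["close"]
--     return sub
-- ===== Notes on version B (the rewrite author's own statement) =====
-- stated objective: alternative
-- what changed: Replaces A's up-to-six repeated scans of cols with a single pass that builds a first-occurrence lowercase index dict and remembers the first substring 'close' match, then resolves by O(1) dict lookups.
import Mathlib
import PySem

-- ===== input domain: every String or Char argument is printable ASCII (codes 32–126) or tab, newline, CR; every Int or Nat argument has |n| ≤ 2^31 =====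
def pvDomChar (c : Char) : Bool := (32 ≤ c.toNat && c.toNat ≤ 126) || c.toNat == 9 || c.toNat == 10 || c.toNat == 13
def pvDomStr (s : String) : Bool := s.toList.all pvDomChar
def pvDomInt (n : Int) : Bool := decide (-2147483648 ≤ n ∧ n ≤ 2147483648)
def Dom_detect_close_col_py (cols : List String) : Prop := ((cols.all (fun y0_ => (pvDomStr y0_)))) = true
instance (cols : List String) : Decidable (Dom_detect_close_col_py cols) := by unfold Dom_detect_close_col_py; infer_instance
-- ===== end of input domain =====

-- B replaces A's up-to-six repeated scans of cols with one indexing pass plus O(1) dict lookups (alternative structure, same asymptotic cost).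

-- ===== PORT A =====
-- inner loop: 'for c in cols: if c.lower() == key: return c'
def pvAInner (cols : List String) (key : String) : Option String :=
  match cols with
  | [] => none
  | c :: rest => if PySem.Str.lower c == key then some c else pvAInner rest key

-- outer loop over the key tuple
def pvAKeys (keys : List String) (cols : List String) : Option String :=
  match keys with
  | [] => none
  | k :: ks =>
    match pvAInner cols k with
    | some c => some c
    | none => pvAKeys ks cols

-- third loop: 'for c in cols: if "close" in c.lower(): return c'
def pvASub (cols : List String) : Option String :=
  match cols with
  | [] => none
  | c :: rest => if PySem.Str.isIn "close" (PySem.Str.lower c) then some c else pvASub rest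

def detect_close_col_py (cols : List String) : Option String :=
  match pvAKeys ["close_eff", "closeeff", "p_eff", "peff"] cols with
  | some c => some c
  | none =>
    match pvAInner cols "close" with
    | some c => some c
    | none => pvASub cols

-- ===== PORT B =====
-- single pass: build first-occurrence lowercase index and remember first substring 'close' hit
def pvBScan (cols : List String) (d : PySem.Dict String String) (sub : Option String) :
    PySem.Dict String String × Option String :=
  match cols with
  | [] => (d, sub)
  | c :: rest =>
    let lc := PySem.Str.lower c
    let d' := if d.contains lc then d else d.insert lc c
    let sub' := if sub.isNone && PySem.Str.isIn "close" lc then some c else sub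
    pvBScan rest d' sub'

-- 'for key in (...): if key in index: return index[key]'
def pvBResolve (d : PySem.Dict String String) (keys : List String) : Option String :=
  match keys with
  | [] => none
  | k :: ks =>
    match d.get? k with
    | some v => some v
    | none => pvBResolve d ks

def detect_close_col_py_alt (cols : List String) : Option String :=
  let res := pvBScan cols PySem.Dict.empty none
  match pvBResolve res.1 ["close_eff", "closeeff", "p_eff", "peff"] with
  | some v => some v
  | none =>
    match res.1.get? "close" with
    | some v => some v
    | none => res.2

-- ===== PRECONDITION & SPEC =====
def Spec_detect_close_col_py (cols : List String) (out : Option String) : Prop := out = detect_close_col_py_alt cols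
instance (cols : List String) (out : Option String) : Decidable (Spec_detect_close_col_py cols out) := by unfold Spec_detect_close_col_py; infer_instance

-- ===== CLAIM (what is proved, stated in full; the proofs are below) =====
def Claim_equal_detect_close_col_py : Prop := ∀ (cols : List String), Dom_detect_close_col_py cols → Spec_detect_close_col_py cols (detect_close_col_py cols)

-- ===== LEMMAS AND PROOFS =====

-- the index built by the scan answers exactly like A's linear scan for the key
theorem pvBScan_get? (cols : List String) (d : PySem.Dict String String) (sub : Option String)
    (key : String) :
    ((pvBScan cols d sub).1).get? key = (d.get? key).or (pvAInner cols key) := by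
  induction cols generalizing d sub with
  | nil => simp [pvBScan, pvAInner]
  | cons c rest ih =>
    simp only [pvBScan, pvAInner]
    rw [ih]
    by_cases hk : PySem.Str.lower c == key
    · have hk' : PySem.Str.lower c = key := by simpa using hk
      subst hk'
      by_cases hc : d.contains (PySem.Str.lower c)
      · simp only [hc, if_true, beq_self_eq_true]
        rcases h : d.get? (PySem.Str.lower c) with _ | v
        · rw [PySem.Dict.contains_eq_isSome_get?] at hc
          simp [h] at hc
        · simp
      · simp only [hc, if_false, Bool.false_eq_true, beq_self_eq_true, if_true]
        have hnone : d.get? (PySem.Str.lower c) = none := by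
          rw [PySem.Dict.contains_eq_isSome_get?] at hc
          cases h : d.get? (PySem.Str.lower c) <;> simp [h] at hc ⊢
        rw [hnone]
        simp [PySem.Dict.get?_insert]
    · have hne : key ≠ PySem.Str.lower c := by
        intro h; exact hk (by simp [h])
      by_cases hc : d.contains (PySem.Str.lower c)
      · simp [hc, hk]
      · simp [hc, hk, PySem.Dict.get?_insert, hne]

-- the remembered substring hit equals A's third scan (first one wins)
theorem pvBScan_sub (cols : List String) (d : PySem.Dict String String) (sub : Option String) :
    (pvBScan cols d sub).2 = sub.or (pvASub cols) := by
  induction cols generalizing d sub with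
  | nil => simp [pvBScan, pvASub]
  | cons c rest ih =>
    simp only [pvBScan, pvASub]
    rw [ih]
    cases sub with
    | none => split_ifs with h <;> simp_all
    | some s => simp

theorem pvBResolve_eq (cols : List String) (keys : List String) (sub : Option String) :
    pvBResolve (pvBScan cols PySem.Dict.empty sub).1 keys = pvAKeys keys cols := by
  induction keys with
  | nil => simp [pvBResolve, pvAKeys]
  | cons k ks ih =>
    simp only [pvBResolve, pvAKeys]
    rw [pvBScan_get?]
    simp only [PySem.Dict.get?_empty, Option.or]
    rw [ih]

-- ===== VERDICT (by name: the statement is the Claim_ definition above) =====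
theorem detect_close_col_py_spec : Claim_equal_detect_close_col_py := by
  intro cols _
  have h1 := pvBResolve_eq cols ["close_eff", "closeeff", "p_eff", "peff"] none
  have h2 := pvBScan_get? cols PySem.Dict.empty none "close"
  have h3 := pvBScan_sub cols PySem.Dict.empty none
  simp only [Spec_detect_close_col_py, detect_close_col_py, detect_close_col_py_alt,
    h1, h2, h3, PySem.Dict.get?_empty, Option.or]
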